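-- pv_equiv track=rewrite | github.com/coolka1234/Tech-Interview-Pratice | python/house_robber.py | rob_houses
-- ===== SOURCE A (Python) =====
-- def rob_houses(array):
--     sum_1, sum_2=0, 0
--     num_of_houses=len(array)
--     for i in range(num_of_houses):
--         if(i%2==0):
--             sum_2+=array[i]
--         else:
--             sum_1+=array[i]
--     return max(sum_1, sum_2)
-- ===== SOURCE B (Python) =====
-- def rob_houses(array):
--     # Two separate strided passes: sum the even-index slice and the odd-index slice.
--     return max(sum(array[::2]), sum(array[1::2]))
-- ===== Notes on version B (the rewrite author's own statement) =====
-- stated objective: simpler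
-- what changed: Replaces the single index loop with an i%2 parity branch by two separate strided-slice passes: B returns max(sum(array[::2]), sum(array[1::2])), a pure expression with no loop, no indices and no modulo.
import Mathlib
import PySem

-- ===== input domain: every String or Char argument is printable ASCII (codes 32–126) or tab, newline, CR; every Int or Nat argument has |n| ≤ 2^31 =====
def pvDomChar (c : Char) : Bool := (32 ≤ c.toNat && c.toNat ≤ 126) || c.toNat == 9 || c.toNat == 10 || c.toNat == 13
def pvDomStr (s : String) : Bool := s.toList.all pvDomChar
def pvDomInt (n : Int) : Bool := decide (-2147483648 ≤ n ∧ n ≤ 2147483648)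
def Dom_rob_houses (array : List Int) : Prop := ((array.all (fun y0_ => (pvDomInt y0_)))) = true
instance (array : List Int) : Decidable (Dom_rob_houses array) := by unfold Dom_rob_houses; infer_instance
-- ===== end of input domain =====

-- B replaces A's single index loop with an i%2 parity branch by two separate
-- strided-slice passes: max(sum(array[::2]), sum(array[1::2])) (objective: simpler).

-- ===== PORT A =====
def rob_houses (array : List Int) : Int :=
  let num_of_houses : Int := PySem.List.len array
  let p :=
    (PySem.List.pyRange 0 num_of_houses 1).foldl
      (fun (p : Int × Int) i =>
        if PySem.Int.mod i 2 = 0 then (p.1, p.2 + PySem.List.pyGetD array i 0)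
        else (p.1 + PySem.List.pyGetD array i 0, p.2))
      (0, 0)
  max p.1 p.2

-- ===== PORT B =====
def rob_houses_alt (array : List Int) : Int :=
  max (((PySem.List.slice? array none none 2).getD []).sum)
      (((PySem.List.slice? array (some 1) none 2).getD []).sum)

-- ===== PRECONDITION & SPEC =====
def Spec_rob_houses (array : List Int) (out : Int) : Prop := out = rob_houses_alt array
instance (array : List Int) (out : Int) : Decidable (Spec_rob_houses array out) := by unfold Spec_rob_houses; infer_instance

-- ===== CLAIM (what is proved, stated in full; the proofs are below) =====
def Claim_equal_rob_houses : Prop := ∀ (array : List Int), Dom_rob_houses array → Spec_rob_houses array (rob_houses array)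

-- ===== LEMMAS AND PROOFS =====

-- the even-index / odd-index sublists of a list
mutual
def evens : List Int → List Int
  | [] => []
  | x :: xs => x :: odds xs
def odds : List Int → List Int
  | [] => []
  | _ :: xs => evens xs
end

-- sums of the even-index / odd-index elements
def eS (xs : List Int) : Int := (evens xs).sum
def oS (xs : List Int) : Int := (odds xs).sum

theorem eS_nil : eS [] = 0 := rfl
theorem oS_nil : oS [] = 0 := rfl
theorem eS_cons (x : Int) (xs : List Int) : eS (x :: xs) = x + oS xs := by
  simp [eS, oS, evens]
theorem oS_cons (x : Int) (xs : List Int) : oS (x :: xs) = eS xs := by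
  simp [eS, oS, odds]

-- the filterMap-over-range forms that slice? produces are exactly evens / odds
theorem fm_pair : ∀ (xs : List Int),
    List.filterMap (fun k => xs[2*k]?) (List.range ((xs.length+1)/2)) = evens xs ∧
    List.filterMap (fun k => xs[2*k+1]?) (List.range (xs.length/2)) = odds xs := by
  intro xs
  induction xs with
  | nil => simp [evens, odds]
  | cons x xs ih =>
    constructor
    · have h : ((x::xs).length + 1)/2 = xs.length/2 + 1 := by simp; omega
      rw [h, List.range_succ_eq_map, List.filterMap_cons, List.filterMap_map]
      simp only [Nat.mul_zero, List.getElem?_cons_zero, Function.comp_def]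
      have hidx : ∀ k, (x::xs)[2*(k+1)]? = xs[2*k+1]? := by
        intro k
        have h2 : 2*(k+1) = (2*k+1)+1 := by omega
        rw [h2, List.getElem?_cons_succ]
      simp only [hidx]
      rw [ih.2]
      rfl
    · have h : (x::xs).length/2 = (xs.length+1)/2 := by simp
      rw [h]
      have hidx : ∀ k, (x::xs)[2*k+1]? = xs[2*k]? := by
        intro k; rw [List.getElem?_cons_succ]
      simp only [hidx]
      rw [ih.1]
      rfl

-- xs[::2] is evens xs
theorem slice_even (xs : List Int) :
    PySem.List.slice? xs none none 2 = some (evens xs) := by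
  rw [← (fm_pair xs).1]
  simp only [PySem.List.slice?, PySem.List.sliceIndices]
  norm_num
  have hc : (if 0 < xs.length then (((xs.length:Int) + 2 - 1) / 2).toNat else 0) = (xs.length + 1) / 2 := by
    split_ifs with h <;> omega
  rw [hc]
  apply List.filterMap_congr
  intro k _
  congr 1

-- xs[1::2] is odds xs
theorem slice_odd (xs : List Int) :
    PySem.List.slice? xs (some 1) none 2 = some (odds xs) := by
  rw [← (fm_pair xs).2]
  simp only [PySem.List.slice?, PySem.List.sliceIndices]
  norm_num
  have hc : (if 1 < xs.length then (((xs.length:Int) - min 1 (xs.length:Int) + 2 - 1) / 2).toNat else 0) = xs.length / 2 := by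
    split_ifs with h <;> omega
  rw [hc]
  apply List.filterMap_congr
  intro k hk
  simp only [List.mem_range] at hk
  congr 1
  omega

theorem alt_eq (xs : List Int) : rob_houses_alt xs = max (eS xs) (oS xs) := by
  unfold rob_houses_alt
  rw [slice_even, slice_odd]
  rfl

-- A's enumerated loop: state after folding (index, value) pairs starting at index s
theorem aFold (xs : List Int) : ∀ (s s1 s2 : Int), 0 ≤ s →
    (PySem.List.enumerate xs s).foldl
      (fun (p : Int × Int) ix =>
        if PySem.Int.mod ix.1 2 = 0 then (p.1, p.2 + ix.2) else (p.1 + ix.2, p.2)) (s1, s2) =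
      if PySem.Int.mod s 2 = 0 then (s1 + oS xs, s2 + eS xs) else (s1 + eS xs, s2 + oS xs) := by
  induction xs with
  | nil => intro s s1 s2 _; simp [PySem.List.enumerate, eS_nil, oS_nil]
  | cons x xs ih =>
    intro s s1 s2 hs
    rw [PySem.List.enumerate_cons, List.foldl_cons]
    have hmod : PySem.Int.mod s 2 = s % 2 := PySem.Int.mod_eq_emod_of_pos (by omega)
    have hmod1 : PySem.Int.mod (s + 1) 2 = (s + 1) % 2 := PySem.Int.mod_eq_emod_of_pos (by omega)
    rcases Int.emod_two_eq_zero_or_one s with h | h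
    · have hc : PySem.Int.mod s 2 = 0 := by rw [hmod]; exact h
      have hc1 : ¬ PySem.Int.mod (s + 1) 2 = 0 := by rw [hmod1]; omega
      simp only [if_pos hc]
      rw [ih (s + 1) s1 (s2 + x) (by omega), if_neg hc1, eS_cons, oS_cons]
      exact Prod.ext (by ring) (by ring)
    · have hc : ¬ PySem.Int.mod s 2 = 0 := by rw [hmod]; omega
      have hc1 : PySem.Int.mod (s + 1) 2 = 0 := by rw [hmod1]; omega
      simp only [if_neg hc]
      rw [ih (s + 1) (s1 + x) s2 (by omega), if_pos hc1, eS_cons, oS_cons]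
      exact Prod.ext (by ring) (by ring)

theorem a_eq (xs : List Int) : rob_houses xs = max (oS xs) (eS xs) := by
  have key := aFold xs 0 0 0 le_rfl
  rw [PySem.List.enumerate_eq_map_pyRange xs 0, List.foldl_map,
    if_pos (show PySem.Int.mod 0 2 = 0 from rfl)] at key
  have hmapfold :
      ((PySem.List.pyRange 0 (PySem.List.len xs) 1).map
          (fun j => (j, PySem.List.pyGetD xs j 0))).foldl
        (fun (p : Int × Int) ix =>
          if PySem.Int.mod ix.1 2 = 0 then (p.1, p.2 + ix.2) else (p.1 + ix.2, p.2)) (0, 0)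
      = (PySem.List.pyRange 0 (PySem.List.len xs) 1).foldl
        (fun (p : Int × Int) i =>
          if PySem.Int.mod i 2 = 0 then (p.1, p.2 + PySem.List.pyGetD xs i 0)
          else (p.1 + PySem.List.pyGetD xs i 0, p.2)) (0, 0) := by
    rw [List.foldl_map]
  simp only [rob_houses]
  rw [← hmapfold, List.foldl_map, key]
  norm_num

-- ===== VERDICT (by name: the statement is the Claim_ definition above) =====
theorem rob_houses_spec : Claim_equal_rob_houses := by
  intro array _
  show rob_houses array = rob_houses_alt array
  rw [a_eq, alt_eq, max_comm]
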